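-- pv_equiv track=rewrite | github.com/rouxmi/Bird-Democratie-Participative | python/recherche.py | liste_occurences
-- ===== SOURCE A (Python) =====
-- def liste_occurences(mots_recherches,L):
--     nb_subs = len(L)
--     subs = [0]*nb_subs
--     ban_list=['de','du','le','la','les','un','une','des','je','tu','il','nous','vous','ils','elle','elles','on','au','aux','à','d','l']
--     for i in range(nb_subs):
--         sub = L[i]
--         mots = []
--         for j in range(3):
--             mots = mots + sub[j].replace(' ',',').replace("'",",").split(',')
--         occurence = 0
--         for mot in mots:
--             if mot not in ban_list:
--                 if mot in mots_recherches:
--                     occurence += 1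
--         subs[i] = occurence
--     return subs
-- ===== SOURCE B (Python) =====
-- def liste_occurences(mots_recherches, L):
--     ban_list = ['de','du','le','la','les','un','une','des','je','tu','il','nous','vous','ils','elle','elles','on','au','aux','à','d','l']
--     terms = set(mots_recherches) - set(ban_list)
--     result = []
--     for sub in L:
--         counts = {}
--         for j in range(3):
--             for tok in sub[j].replace(' ', ',').replace("'", ",").split(','):
--                 counts[tok] = counts.get(tok, 0) + 1
--         total = 0
--         for tok, c in counts.items():
--             if tok in terms:
--                 total += c
--         result.append(total)
--     return result
-- ===== Notes on version B (the rewrite author's own statement) =====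
-- stated objective: faster
-- what changed: B precomputes set(mots_recherches) - set(ban_list) once and, per sublist, builds a token frequency dict and sums the counts of its entries that lie in that set, replacing A's per-token linear membership scans of ban_list and mots_recherches.
import Mathlib
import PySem

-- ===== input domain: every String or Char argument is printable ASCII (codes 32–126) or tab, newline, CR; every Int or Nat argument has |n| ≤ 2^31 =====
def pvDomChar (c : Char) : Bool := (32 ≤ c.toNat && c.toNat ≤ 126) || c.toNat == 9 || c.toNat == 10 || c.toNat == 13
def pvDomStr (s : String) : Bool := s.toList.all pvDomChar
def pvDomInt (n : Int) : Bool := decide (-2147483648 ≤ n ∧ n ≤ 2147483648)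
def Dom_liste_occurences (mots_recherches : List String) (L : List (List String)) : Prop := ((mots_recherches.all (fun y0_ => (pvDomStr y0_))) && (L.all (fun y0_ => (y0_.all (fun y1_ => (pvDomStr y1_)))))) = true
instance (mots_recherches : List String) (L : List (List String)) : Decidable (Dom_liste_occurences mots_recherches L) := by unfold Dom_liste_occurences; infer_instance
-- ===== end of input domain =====

-- B builds the non-banned search-term set once and a per-sublist token frequency table, then sums
-- the counts of the tokens found in that set, instead of A's per-token list-membership scans;
-- measurably faster on large inputs.

def pvBan : List String :=
  ["de","du","le","la","les","un","une","des","je","tu","il","nous","vous","ils","elle","elles","on","au","aux","à","d","l"]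

-- tokens of sub[j]: sub[j].replace(' ',',').replace("'",",").split(',')
def pvTok (sub : List String) (j : Int) : List String :=
  (PySem.Str.split? (PySem.Str.replace (PySem.Str.replace (PySem.List.pyGetD sub j "") " " ",") "'" ",") ",").getD []

-- ===== PORT A =====
def liste_occurences (mots_recherches : List String) (L : List (List String)) : List Int :=
  let nb_subs := L.length
  (PySem.List.pyRange 0 nb_subs 1).foldl
    (fun subs i =>
      let sub := PySem.List.pyGetD L i []
      let mots := (PySem.List.pyRange 0 3 1).foldl (fun mots j => mots ++ pvTok sub j) []
      let occurence : Int := mots.foldl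
        (fun occurence mot =>
          if pvBan.contains mot then occurence
          else if mots_recherches.contains mot then occurence + 1 else occurence) 0
      PySem.List.pySetD subs i occurence)
    (List.replicate nb_subs 0)

-- ===== PORT B =====
def liste_occurences_alt (mots_recherches : List String) (L : List (List String)) : List Int :=
  let terms := PySem.Set.diff (PySem.Set.ofList mots_recherches) (PySem.Set.ofList pvBan)
  L.foldl
    (fun result sub =>
      let counts : PySem.Dict String Int :=
        (PySem.List.pyRange 0 3 1).foldl
          (fun counts j => (pvTok sub j).foldl (fun c tok => c.modify tok 0 (· + 1)) counts)
          PySem.Dict.empty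
      let total : Int := counts.items.foldl
        (fun total kv => if PySem.Set.contains terms kv.1 then total + kv.2 else total) 0
      result ++ [total])
    []

-- ===== PRECONDITION & SPEC =====
-- A indexes sub[0..2]; it raises IndexError on any sublist shorter than 3 (B does too).
def Pre_liste_occurences (mots_recherches : List String) (L : List (List String)) : Prop :=
  ∀ sub ∈ L, 3 ≤ sub.length
instance (mots_recherches : List String) (L : List (List String)) : Decidable (Pre_liste_occurences mots_recherches L) := by unfold Pre_liste_occurences; infer_instance
def pvWitness_liste_occurences : List String × List (List String) :=
  (["chat", "d"], [["le chat", "d'or", "chat"], ["a", "b", "c"]])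

def Spec_liste_occurences (mots_recherches : List String) (L : List (List String)) (out : List Int) : Prop := out = liste_occurences_alt mots_recherches L
instance (mots_recherches : List String) (L : List (List String)) (out : List Int) : Decidable (Spec_liste_occurences mots_recherches L out) := by unfold Spec_liste_occurences; infer_instance

-- ===== CLAIM (what is proved, stated in full; the proofs are below) =====
def Claim_equal_liste_occurences : Prop := ∀ (mots_recherches : List String) (L : List (List String)), Dom_liste_occurences mots_recherches L → Pre_liste_occurences mots_recherches L → Spec_liste_occurences mots_recherches L (liste_occurences mots_recherches L)

-- ===== LEMMAS AND PROOFS =====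

-- the value both programs compute for one sublist
def pvOcc (mots_recherches : List String) (sub : List String) : Int :=
  ((PySem.List.pyRange 0 3 1).foldl (fun mots j => mots ++ pvTok sub j) []).countP
    (fun m => !pvBan.contains m && mots_recherches.contains m)

-- A's inner token loop is a countP
theorem pvA_inner (ms : List String) (ts : List String) (acc : Int) :
    ts.foldl (fun occ mot =>
        if pvBan.contains mot then occ
        else if ms.contains mot then occ + 1 else occ) acc
      = acc + ts.countP (fun m => !pvBan.contains m && ms.contains m) := by
  induction ts generalizing acc with
  | nil => simp
  | cons m ts ih =>
    simp only [List.foldl_cons, List.countP_cons, ih]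
    by_cases hb : pvBan.contains m <;> by_cases hm : ms.contains m <;>
      simp only [hb, hm, if_true, if_false, Bool.not_true, Bool.not_false, Bool.false_and,
        Bool.true_and, Bool.and_false, Bool.and_true, decide_true, decide_false] <;>
      push_cast <;> omega

-- A's outer loop (write into a zero array by index) is a map
theorem pvA_outer (ms : List String) (pre suf : List (List String)) :
    (PySem.List.pyRange (pre.length) (pre.length + suf.length) 1).foldl
        (fun subs i => PySem.List.pySetD subs i (pvOcc ms (PySem.List.pyGetD (pre ++ suf) i [])))
        (pre.map (pvOcc ms) ++ List.replicate suf.length 0)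
      = (pre ++ suf).map (pvOcc ms) := by
  induction suf generalizing pre with
  | nil => simp
  | cons x suf ih =>
    rw [PySem.List.pyRange_one_cons (a := (pre.length : Int)) (by simp), List.foldl_cons]
    have hget : PySem.List.pyGetD (pre ++ x :: suf) (pre.length : Int) [] = x := by
      rw [PySem.List.pyGetD_natCast]; simp
    have hset : PySem.List.pySetD (pre.map (pvOcc ms) ++ List.replicate (x :: suf).length 0)
        ((pre.length : Int)) (pvOcc ms x)
        = (pre ++ [x]).map (pvOcc ms) ++ List.replicate suf.length 0 := by
      rw [PySem.List.pySetD_natCast, List.length_cons, List.replicate_succ]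
      rw [show pre.length = (pre.map (pvOcc ms)).length by simp]
      simp
    simp only [hget]
    rw [hset]
    rw [show ((pre.length : Int) + ↑(x :: suf).length) = (((pre ++ [x]).length : Int) + ↑suf.length) by simp; omega]
    rw [show ((pre.length : Int) + 1) = ((pre ++ [x]).length : Int) by simp]
    rw [show pre ++ x :: suf = pre ++ [x] ++ suf by simp]
    exact ih (pre ++ [x])

-- nested counting loop = counter of the concatenated tokens
theorem pvB_counts (step : PySem.Dict String Int → String → PySem.Dict String Int)
    (tok : Int → List String) (is : List Int) (ts : List String) (d : PySem.Dict String Int) :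
    is.foldl (fun c j => (tok j).foldl step c) (ts.foldl step d)
      = ((is.foldl (fun m j => m ++ tok j) ts).foldl step d) := by
  induction is generalizing ts with
  | nil => rfl
  | cons j is ih => simp only [List.foldl_cons, ← List.foldl_append, ih]

-- disjoint countP splits
theorem pvCountP_or (ts : List String) (p q : String → Bool) (h : ∀ m, ¬(p m = true ∧ q m = true)) :
    ts.countP (fun m => p m || q m) = ts.countP p + ts.countP q := by
  induction ts with
  | nil => rfl
  | cons m ts ih =>
    have := h m
    simp only [List.countP_cons, ih]
    by_cases hp : p m <;> by_cases hq : q m <;> simp [hp, hq] at * <;> omega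

-- B's sum over the distinct tokens is A's countP
theorem pvB_sum (q : String → Bool) (us ts : List String) (hn : us.Nodup) (acc : Int) :
    us.foldl (fun tot t => if q t then tot + (ts.count t : Int) else tot) acc
      = acc + ts.countP (fun m => q m && us.contains m) := by
  induction us generalizing acc with
  | nil => simp
  | cons u us ih =>
    have hu : u ∉ us := (List.nodup_cons.mp hn).1
    have hus : us.Nodup := (List.nodup_cons.mp hn).2
    simp only [List.foldl_cons]
    have hsplit : ts.countP (fun m => q m && (u :: us).contains m)
        = ts.countP (fun m => q m && m == u)
          + ts.countP (fun m => q m && us.contains m) := by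
      rw [← pvCountP_or]
      · apply List.countP_congr
        intro m _
        by_cases hq : q m <;> by_cases hm : m = u <;> simp [hq, hm] <;> tauto
      · intro m ⟨h1, h2⟩
        simp at h1 h2
        exact hu (h1.2 ▸ h2.2)
    by_cases hq : q u
    · have h1 : ts.countP (fun m => q m && m == u) = ts.count u := by
        rw [List.count]
        apply List.countP_congr
        intro m _
        by_cases hm : m = u
        · subst hm
          simp [hq]
        · simp [hm]
      rw [if_pos hq, ih hus, hsplit, h1]
      push_cast
      omega
    · have h0 : ts.countP (fun m => q m && m == u) = 0 := by
        rw [List.countP_eq_zero]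
        intro m _ hm
        rw [Bool.and_eq_true, beq_iff_eq] at hm
        exact hq (hm.2 ▸ hm.1)
      rw [if_neg hq, ih hus, hsplit, h0]
      push_cast
      omega

-- B's items loop over one sublist's counter is A's countP for that sublist
theorem pvB_total (ms ts : List String) :
    (PySem.Dict.counter ts).items.foldl
        (fun total (kv : String × Int) =>
          if PySem.Set.contains (PySem.Set.diff (PySem.Set.ofList ms) (PySem.Set.ofList pvBan)) kv.1
          then total + kv.2 else total) 0
      = ts.countP (fun m => !pvBan.contains m && ms.contains m) := by
  rw [PySem.Dict.items_counter, List.foldl_map]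
  simp only []
  rw [pvB_sum _ _ ts (PySem.Set.nodup_ofList ts) 0, zero_add]
  have h : List.countP (fun m =>
        PySem.Set.contains (PySem.Set.diff (PySem.Set.ofList ms) (PySem.Set.ofList pvBan)) m
          && List.contains (PySem.Set.ofList ts) m) ts
      = List.countP (fun m => !pvBan.contains m && ms.contains m) ts := by
    apply List.countP_congr
    intro m hm
    have hts : List.contains (PySem.Set.ofList ts) m = true := by
      simpa [PySem.Set.contains_iff] using (PySem.Set.mem_ofList ts m).mpr hm
    by_cases h1 : m ∈ ms <;> by_cases h2 : m ∈ pvBan <;>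
      simp [hts, hm, h1, h2, PySem.Set.contains_iff, PySem.Set.mem_diff, PySem.Set.mem_ofList]
  rw [h]

-- ===== VERDICT (by name: the statement is the Claim_ definition above) =====
theorem liste_occurences_spec : Claim_equal_liste_occurences := by
  intro ms L _ _
  unfold Spec_liste_occurences
  have hA : liste_occurences ms L = L.map (pvOcc ms) := by
    unfold liste_occurences
    have hfun : (fun (subs : List Int) (i : Int) =>
        let sub := PySem.List.pyGetD L i []
        let mots := (PySem.List.pyRange 0 3 1).foldl (fun mots j => mots ++ pvTok sub j) []
        let occurence : Int := mots.foldl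
          (fun occurence mot =>
            if pvBan.contains mot then occurence
            else if ms.contains mot then occurence + 1 else occurence) 0
        PySem.List.pySetD subs i occurence)
        = (fun subs i => PySem.List.pySetD subs i (pvOcc ms (PySem.List.pyGetD L i []))) := by
      funext subs i
      simp only [pvA_inner ms, zero_add]
      rfl
    rw [hfun]
    have h := pvA_outer ms [] L
    simpa using h
  have hB : liste_occurences_alt ms L = L.map (pvOcc ms) := by
    unfold liste_occurences_alt
    have hfun : ∀ (result : List Int) (sub : List String), sub ∈ L →
        (let counts : PySem.Dict String Int :=
          (PySem.List.pyRange 0 3 1).foldl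
            (fun counts j => (pvTok sub j).foldl (fun c tok => c.modify tok 0 (· + 1)) counts)
            PySem.Dict.empty
        let total : Int := counts.items.foldl
          (fun total kv =>
            if PySem.Set.contains ((PySem.Set.ofList ms).diff (PySem.Set.ofList pvBan)) kv.1
            then total + kv.2 else total) 0
        result ++ [total])
        = result ++ [pvOcc ms sub] := by
      intro result sub _
      have hc := pvB_counts (fun c tok => c.modify tok 0 (· + 1)) (pvTok sub)
        (PySem.List.pyRange 0 3 1) [] PySem.Dict.empty
      simp only [List.foldl_nil] at hc
      simp only [hc, ← PySem.Dict.counter_eq_foldl]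
      rw [pvB_total ms]
      rfl
    rw [PySem.List.foldl_congr_mem L _ (fun result sub => result ++ [pvOcc ms sub]) [] hfun]
    simpa using PySem.List.foldl_append_singleton_eq_map (pvOcc ms) L []
  rw [hA, hB]
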